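-- pv_equiv track=rewrite | github.com/pkLo67/Bioinformatics_Projects_in_Python | ORF_Analysis/ORF_Analysis_Program.py | three_frames_codon_arrays
-- ===== SOURCE A (Python) =====
-- def three_frames_codon_arrays(sequence):
--     frame_1 = []
--     frame_2 = []
--     frame_3 = []
--     three_frames = [frame_1, frame_2, frame_3]
--
--     for i in range(3):
--         for n in range(i, len(sequence)-2, 3):
--             codon = sequence[n:n+3]
--             three_frames[i].append(codon)
--
--     return three_frames
-- ===== SOURCE B (Python) =====
-- def three_frames_codon_arrays(sequence):
--     # Back-to-front sweep with frame rotation: walking from the last codon start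
--     # down to 0, the current codon always belongs to "frame 0 relative to n",
--     # so we append it (lists are kept reversed) and rotate the three frames.
--     a, b, c = [], [], []
--     for n in reversed(range(len(sequence) - 2)):
--         c.append(sequence[n:n+3])
--         a, b, c = c, a, b
--     return [a[::-1], b[::-1], c[::-1]]
-- ===== Notes on version B (the rewrite author's own statement) =====
-- stated objective: alternative
-- what changed: Replaced the nested strided loops (outer over the three frames, inner stepping by 3) with one back-to-front sweep that appends each codon to a rotating triple of reversed frames and reverses the three lists once at the end.
import Mathlib
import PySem

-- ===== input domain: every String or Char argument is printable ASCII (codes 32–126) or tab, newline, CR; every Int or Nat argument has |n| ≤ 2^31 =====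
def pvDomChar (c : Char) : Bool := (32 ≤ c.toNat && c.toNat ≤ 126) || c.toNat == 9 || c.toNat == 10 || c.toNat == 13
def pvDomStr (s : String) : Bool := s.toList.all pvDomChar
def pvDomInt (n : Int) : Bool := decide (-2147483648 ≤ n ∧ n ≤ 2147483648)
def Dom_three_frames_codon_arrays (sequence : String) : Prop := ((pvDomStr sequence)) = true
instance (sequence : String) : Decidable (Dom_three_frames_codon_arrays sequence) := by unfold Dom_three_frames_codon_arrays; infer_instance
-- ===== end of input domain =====

-- B replaces A's nested strided loops with a single back-to-front sweep that keeps a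
-- rotating triple of (reversed) frames and reverses them once at the end (objective: alternative).


-- ===== PORT A =====
-- for i in range(3): for n in range(i, len(sequence)-2, 3): three_frames[i].append(sequence[n:n+3])
def three_frames_codon_arrays (sequence : String) : List (List String) :=
  (PySem.List.pyRange 0 3 1).foldl
    (fun three_frames i =>
      (PySem.List.pyRange i (PySem.Str.len sequence - 2) 3).foldl
        (fun three_frames n =>
          let codon := PySem.Str.slice sequence (some n) (some (n + 3))
          PySem.List.pySetD three_frames i
            (PySem.List.pyGetD three_frames i [] ++ [codon]))
        three_frames)
    [[], [], []]

-- ===== PORT B =====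
-- for n in reversed(range(len(sequence)-2)): c.append(sequence[n:n+3]); a,b,c = c,a,b
-- return [a[::-1], b[::-1], c[::-1]]
def three_frames_codon_arrays_alt (sequence : String) : List (List String) :=
  let st :=
    ((PySem.List.pyRange 0 (PySem.Str.len sequence - 2) 1).reverse).foldl
      (fun (st : List String × List String × List String) n =>
        let (a, b, c) := st
        (c ++ [PySem.Str.slice sequence (some n) (some (n + 3))], a, b))
      ([], [], [])
  [st.1.reverse, st.2.1.reverse, st.2.2.reverse]

-- ===== PRECONDITION & SPEC =====
def Spec_three_frames_codon_arrays (sequence : String) (out : List (List String)) : Prop := out = three_frames_codon_arrays_alt sequence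
instance (sequence : String) (out : List (List String)) : Decidable (Spec_three_frames_codon_arrays sequence out) := by unfold Spec_three_frames_codon_arrays; infer_instance

-- ===== CLAIM (what is proved, stated in full; the proofs are below) =====
def Claim_equal_three_frames_codon_arrays : Prop := ∀ (sequence : String), Dom_three_frames_codon_arrays sequence → Spec_three_frames_codon_arrays sequence (three_frames_codon_arrays sequence)

-- ===== LEMMAS AND PROOFS =====

theorem three_frames_pyRange3_empty (k b : Int) (h : b ≤ k) :
    PySem.List.pyRange k b 3 = [] := by
  rw [PySem.List.pyRange_of_pos k b (by norm_num)]
  rw [if_neg (by omega)]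
  simp

theorem three_frames_pyRange3_cons (a b : Int) (h : a < b) :
    PySem.List.pyRange a b 3 = a :: PySem.List.pyRange (a + 3) b 3 := by
  rw [PySem.List.pyRange_of_pos a b (by norm_num),
      PySem.List.pyRange_of_pos (a + 3) b (by norm_num)]
  rw [if_pos (by omega)]
  by_cases h3 : a + 3 < b
  · rw [if_pos h3]
    have hN : ((b - a + 3 - 1) / 3).toNat = ((b - (a + 3) + 3 - 1) / 3).toNat + 1 := by
      omega
    rw [hN, List.range_succ_eq_map, List.map_cons, List.map_map]
    congr 1
    · simp
    · apply List.map_congr_left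
      intro j _
      simp [Function.comp]
      ring
  · rw [if_neg h3]
    have hN : ((b - a + 3 - 1) / 3).toNat = 1 := by omega
    simp [hN, List.range_succ]

-- the inner loop of A, for each literal frame index
theorem three_frames_innerA0 (f : Int → String) (ns : List Int) (a b c : List String) :
    ns.foldl (fun fr n =>
        PySem.List.pySetD fr 0 (PySem.List.pyGetD fr 0 [] ++ [f n])) [a, b, c]
      = [a ++ ns.map f, b, c] := by
  induction ns generalizing a with
  | nil => simp
  | cons n ns ih =>
    simp only [List.foldl_cons, List.map_cons]
    have h : PySem.List.pySetD [a, b, c] 0 (PySem.List.pyGetD [a, b, c] 0 [] ++ [f n])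
        = [a ++ [f n], b, c] := rfl
    rw [h, ih]
    simp

theorem three_frames_innerA1 (f : Int → String) (ns : List Int) (a b c : List String) :
    ns.foldl (fun fr n =>
        PySem.List.pySetD fr 1 (PySem.List.pyGetD fr 1 [] ++ [f n])) [a, b, c]
      = [a, b ++ ns.map f, c] := by
  induction ns generalizing b with
  | nil => simp
  | cons n ns ih =>
    simp only [List.foldl_cons, List.map_cons]
    have h : PySem.List.pySetD [a, b, c] 1 (PySem.List.pyGetD [a, b, c] 1 [] ++ [f n])
        = [a, b ++ [f n], c] := rfl
    rw [h, ih]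
    simp

theorem three_frames_innerA2 (f : Int → String) (ns : List Int) (a b c : List String) :
    ns.foldl (fun fr n =>
        PySem.List.pySetD fr 2 (PySem.List.pyGetD fr 2 [] ++ [f n])) [a, b, c]
      = [a, b, c ++ ns.map f] := by
  induction ns generalizing c with
  | nil => simp
  | cons n ns ih =>
    simp only [List.foldl_cons, List.map_cons]
    have h : PySem.List.pySetD [a, b, c] 2 (PySem.List.pyGetD [a, b, c] 2 [] ++ [f n])
        = [a, b, c ++ [f n]] := rfl
    rw [h, ih]
    simp

-- A computes the three strided maps
theorem three_frames_A_eq (sequence : String) :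
    three_frames_codon_arrays sequence =
      [ (PySem.List.pyRange 0 (PySem.Str.len sequence - 2) 3).map
          (fun n => PySem.Str.slice sequence (some n) (some (n + 3))),
        (PySem.List.pyRange 1 (PySem.Str.len sequence - 2) 3).map
          (fun n => PySem.Str.slice sequence (some n) (some (n + 3))),
        (PySem.List.pyRange 2 (PySem.Str.len sequence - 2) 3).map
          (fun n => PySem.Str.slice sequence (some n) (some (n + 3))) ] := by
  have hr : PySem.List.pyRange 0 3 1 = [0, 1, 2] := by decide
  unfold three_frames_codon_arrays
  rw [hr]
  simp only [List.foldl_cons, List.foldl_nil]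
  rw [three_frames_innerA0, three_frames_innerA1, three_frames_innerA2]
  simp

-- the invariant of B's back-to-front sweep, phrased as a foldr over the ascending range:
-- after folding the suffix [n, n+k) the three (reversed) frames are the reversed strided maps
theorem three_frames_B_inv (f : Int → String) (k : Nat) :
    ∀ (n : Int),
    (PySem.List.pyRange n (n + (k : Int)) 1).foldr
      (fun m (st : List String × List String × List String) =>
        let (a, b, c) := st
        (c ++ [f m], a, b))
      ([], [], [])
    = (((PySem.List.pyRange n (n + (k : Int)) 3).map f).reverse,
       ((PySem.List.pyRange (n + 1) (n + (k : Int)) 3).map f).reverse,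
       ((PySem.List.pyRange (n + 2) (n + (k : Int)) 3).map f).reverse) := by
  induction k with
  | zero =>
    intro n
    simp only [Nat.cast_zero, add_zero]
    rw [PySem.List.pyRange_one_eq_nil (by omega),
        three_frames_pyRange3_empty n n (by omega),
        three_frames_pyRange3_empty (n + 1) n (by omega),
        three_frames_pyRange3_empty (n + 2) n (by omega)]
    simp
  | succ k ih =>
    intro n
    have hb : n + ((k + 1 : Nat) : Int) = (n + 1) + (k : Int) := by push_cast; ring
    rw [hb, PySem.List.pyRange_one_cons (by omega), List.foldr_cons, ih (n + 1)]
    rw [three_frames_pyRange3_cons n ((n + 1) + (k : Int)) (by omega)]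
    have h1 : n + 1 + 2 = n + 3 := by ring
    have h2 : n + 1 + 1 = n + 2 := by ring
    rw [h1, h2]
    simp

-- ===== VERDICT (by name: the statement is the Claim_ definition above) =====
theorem three_frames_codon_arrays_spec : Claim_equal_three_frames_codon_arrays := by
  intro sequence _
  unfold Spec_three_frames_codon_arrays
  rw [three_frames_A_eq]
  unfold three_frames_codon_arrays_alt
  rw [List.foldl_reverse]
  by_cases hm : PySem.Str.len sequence - 2 ≤ 0
  · rw [PySem.List.pyRange_one_eq_nil hm]
    rw [three_frames_pyRange3_empty 0 _ (by omega),
        three_frames_pyRange3_empty 1 _ (by omega),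
        three_frames_pyRange3_empty 2 _ (by omega)]
    simp
  · have hM : PySem.Str.len sequence - 2 = 0 + (((PySem.Str.len sequence - 2).toNat : Nat) : Int) := by
      omega
    rw [hM]
    have := three_frames_B_inv
      (fun n => PySem.Str.slice sequence (some n) (some (n + 3)))
      (PySem.Str.len sequence - 2).toNat 0
    simp only [zero_add] at this ⊢
    rw [this]
    simp
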